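-- pv_equiv track=rewrite | github.com/hr1juldey/Wapi_bot | wapibot/backend/src/dspy_modules/metrics/intent_metric.py | _is_similar_intent
-- ===== SOURCE A (Python) =====
-- def _is_similar_intent(intent1: str, intent2: str) -> bool:
--     """Check if two intents are semantically similar."""
--     similar_pairs = [
--         {"booking", "reservation", "schedule"},
--         {"modification", "change", "update", "reschedule"},
--         {"inquiry", "question", "ask", "clarification"},
--         {"complaint", "issue", "problem"}
--     ]
--
--     for pair in similar_pairs:
--         if intent1 in pair and intent2 in pair:
--             return True
--     return False
-- ===== SOURCE B (Python) =====
-- def _is_similar_intent(intent1: str, intent2: str) -> bool: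
--     """Check if two intents are semantically similar."""
--     groups = [
--         ["booking", "reservation", "schedule"],
--         ["modification", "change", "update", "reschedule"],
--         ["inquiry", "question", "ask", "clarification"],
--         ["complaint", "issue", "problem"]
--     ]
--     index = {w: i for i, grp in enumerate(groups) for w in grp}
--     g1 = index.get(intent1)
--     g2 = index.get(intent2)
--     return g1 is not None and g1 == g2
-- ===== Notes on version B (the rewrite author's own statement) =====
-- stated objective: idiomatic
-- what changed: Replaces the per-group loop with double membership tests by a flat word-to-group-id index built once by enumerating the groups, followed by two lookups and an id comparison.
import Mathlib
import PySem

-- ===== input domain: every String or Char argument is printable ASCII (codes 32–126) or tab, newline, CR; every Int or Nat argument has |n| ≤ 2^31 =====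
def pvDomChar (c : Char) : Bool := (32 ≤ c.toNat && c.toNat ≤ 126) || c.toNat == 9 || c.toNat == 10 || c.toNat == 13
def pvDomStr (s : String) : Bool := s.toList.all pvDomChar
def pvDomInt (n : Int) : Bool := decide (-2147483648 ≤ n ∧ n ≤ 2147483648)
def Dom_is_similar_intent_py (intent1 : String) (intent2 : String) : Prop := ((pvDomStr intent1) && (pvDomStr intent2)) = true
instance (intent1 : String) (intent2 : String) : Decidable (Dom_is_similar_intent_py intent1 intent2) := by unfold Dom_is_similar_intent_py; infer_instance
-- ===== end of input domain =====

-- B builds a flat word-to-group-id index once and compares two lookups, instead of A's scan of the group list with two membership tests per group; the return value is proved equal.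

-- ===== PORT A =====
-- the 'for pair in similar_pairs: if intent1 in pair and intent2 in pair: return True' loop
def pvLoopA (intent1 : String) (intent2 : String) : List (PySem.Set String) → Bool
  | [] => false
  | p :: rest =>
      if PySem.Set.contains p intent1 && PySem.Set.contains p intent2 then true
      else pvLoopA intent1 intent2 rest

def is_similar_intent_py (intent1 : String) (intent2 : String) : Bool :=
  let similar_pairs : List (PySem.Set String) :=
    [PySem.Set.ofList ["booking", "reservation", "schedule"],
     PySem.Set.ofList ["modification", "change", "update", "reschedule"],
     PySem.Set.ofList ["inquiry", "question", "ask", "clarification"],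
     PySem.Set.ofList ["complaint", "issue", "problem"]]
  pvLoopA intent1 intent2 similar_pairs

-- ===== PORT B =====
def is_similar_intent_py_alt (intent1 : String) (intent2 : String) : Bool :=
  let groups : List (List String) :=
    [["booking", "reservation", "schedule"],
     ["modification", "change", "update", "reschedule"],
     ["inquiry", "question", "ask", "clarification"],
     ["complaint", "issue", "problem"]]
  -- {w: i for i, grp in enumerate(groups) for w in grp}
  let index : PySem.Dict String Int :=
    (PySem.List.enumerate groups).foldl
      (fun d p => p.2.foldl (fun d w => d.insert w p.1) d)
      PySem.Dict.empty
  let g1 := index.get? intent1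
  let g2 := index.get? intent2
  g1.isSome && g1 == g2

-- ===== PRECONDITION & SPEC =====
def Spec_is_similar_intent_py (intent1 : String) (intent2 : String) (out : Bool) : Prop := out = is_similar_intent_py_alt intent1 intent2
instance (intent1 : String) (intent2 : String) (out : Bool) : Decidable (Spec_is_similar_intent_py intent1 intent2 out) := by unfold Spec_is_similar_intent_py; infer_instance

-- ===== CLAIM (what is proved, stated in full; the proofs are below) =====
def Claim_equal_is_similar_intent_py : Prop := ∀ (intent1 : String) (intent2 : String), Dom_is_similar_intent_py intent1 intent2 → Spec_is_similar_intent_py intent1 intent2 (is_similar_intent_py intent1 intent2)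

-- ===== LEMMAS AND PROOFS =====

-- every string is one of the 14 intent words or none of them (both orientations of the inequalities, for simp)
lemma pv_word_cases (s : String) :
    ("booking" = s ∨ "reservation" = s ∨ "schedule" = s ∨ "modification" = s ∨ "change" = s ∨ "update" = s ∨ "reschedule" = s ∨ "inquiry" = s ∨ "question" = s ∨ "ask" = s ∨ "clarification" = s ∨ "complaint" = s ∨ "issue" = s ∨ "problem" = s) ∨ ((s ≠ "booking" ∧ "booking" ≠ s) ∧ (s ≠ "reservation" ∧ "reservation" ≠ s) ∧ (s ≠ "schedule" ∧ "schedule" ≠ s) ∧ (s ≠ "modification" ∧ "modification" ≠ s) ∧ (s ≠ "change" ∧ "change" ≠ s) ∧ (s ≠ "update" ∧ "update" ≠ s) ∧ (s ≠ "reschedule" ∧ "reschedule" ≠ s) ∧ (s ≠ "inquiry" ∧ "inquiry" ≠ s) ∧ (s ≠ "question" ∧ "question" ≠ s) ∧ (s ≠ "ask" ∧ "ask" ≠ s) ∧ (s ≠ "clarification" ∧ "clarification" ≠ s) ∧ (s ≠ "complaint" ∧ "complaint" ≠ s) ∧ (s ≠ "issue" ∧ "issue" ≠ s) ∧ (s ≠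 "problem" ∧ "problem" ≠ s)) := by
  by_cases h1 : "booking" = s; · exact Or.inl (by tauto)
  by_cases h2 : "reservation" = s; · exact Or.inl (by tauto)
  by_cases h3 : "schedule" = s; · exact Or.inl (by tauto)
  by_cases h4 : "modification" = s; · exact Or.inl (by tauto)
  by_cases h5 : "change" = s; · exact Or.inl (by tauto)
  by_cases h6 : "update" = s; · exact Or.inl (by tauto)
  by_cases h7 : "reschedule" = s; · exact Or.inl (by tauto)
  by_cases h8 : "inquiry" = s; · exact Or.inl (by tauto)
  by_cases h9 : "question" = s; · exact Or.inl (by tauto)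
  by_cases h10 : "ask" = s; · exact Or.inl (by tauto)
  by_cases h11 : "clarification" = s; · exact Or.inl (by tauto)
  by_cases h12 : "complaint" = s; · exact Or.inl (by tauto)
  by_cases h13 : "issue" = s; · exact Or.inl (by tauto)
  by_cases h14 : "problem" = s; · exact Or.inl (by tauto)
  exact Or.inr ⟨⟨fun h => h1 h.symm, h1⟩, ⟨fun h => h2 h.symm, h2⟩, ⟨fun h => h3 h.symm, h3⟩, ⟨fun h => h4 h.symm, h4⟩, ⟨fun h => h5 h.symm, h5⟩, ⟨fun h => h6 h.symm, h6⟩, ⟨fun h => h7 h.symm, h7⟩, ⟨fun h => h8 h.symm, h8⟩, ⟨fun h => h9 h.symm, h9⟩, ⟨fun h => h10 h.symm, h10⟩, ⟨fun h => h11 h.symm, h11⟩, ⟨fun h => h12 h.symm, h12⟩, ⟨fun h => h13 h.symm, h13⟩, ⟨fun h => h14 h.symm, h14⟩⟩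

-- ===== VERDICT (by name: the statement is the Claim_ definition above) =====
set_option maxHeartbeats 2000000 in
theorem is_similar_intent_py_spec : Claim_equal_is_similar_intent_py := by
  intro intent1 intent2 _
  unfold Spec_is_similar_intent_py
  rcases pv_word_cases intent1 with (rfl|rfl|rfl|rfl|rfl|rfl|rfl|rfl|rfl|rfl|rfl|rfl|rfl|rfl) | h1 <;>
    rcases pv_word_cases intent2 with (rfl|rfl|rfl|rfl|rfl|rfl|rfl|rfl|rfl|rfl|rfl|rfl|rfl|rfl) | h2 <;>
    first
      | decide
      | (first | (obtain ⟨⟨a1,a1'⟩,⟨a2,a2'⟩,⟨a3,a3'⟩,⟨a4,a4'⟩,⟨a5,a5'⟩,⟨a6,a6'⟩,⟨a7,a7'⟩,⟨a8,a8'⟩,⟨a9,a9'⟩,⟨a10,a10'⟩,⟨a11,a11'⟩,⟨a12,a12'⟩,⟨a13,a13'⟩,⟨a14,a14'⟩⟩ := h2) | skip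
         first | (obtain ⟨⟨b1,b1'⟩,⟨b2,b2'⟩,⟨b3,b3'⟩,⟨b4,b4'⟩,⟨b5,b5'⟩,⟨b6,b6'⟩,⟨b7,b7'⟩,⟨b8,b8'⟩,⟨b9,b9'⟩,⟨b10,b10'⟩,⟨b11,b11'⟩,⟨b12,b12'⟩,⟨b13,b13'⟩,⟨b14,b14'⟩⟩ := h1) | skip
         simp [*, is_similar_intent_py, is_similar_intent_py_alt, pvLoopA,
           PySem.Set.contains, PySem.Set.ofList, PySem.List.enumerate,
           PySem.Dict.insert, PySem.Dict.get?, PySem.Dict.empty, PySem.Set.add, List.find?, Bool.beq_eq_decide_eq])
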